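-- pv_equiv track=rewrite | github.com/mantianwuming/work_test | work/xiecheng_test1.py | divide_groups
-- ===== SOURCE A (Python) =====
-- def divide_groups(line):
--     dic = {}
--     for i in range(len(line)-1, -1, -1):
--         if line[i] not in dic:
--             dic[line[i]] = i
--     begin = 0
--     end = 0
--     res = []
--     for x, y in enumerate(line):
--         if dic[y] > end:
--             end = dic[y]
--         if x == end:
--             res.append(end - begin + 1)
--             begin, end = x + 1, x + 1
--     return res
-- ===== SOURCE B (Python) =====
-- def divide_groups(line):
--     # Count total occurrences of each character once.
--     count = {}
--     for c in line:
--         count[c] = count.get(c, 0) + 1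
--     res = []
--     size = 0
--     debt = 0   # occurrences of already-seen characters still ahead
--     seen = {}
--     for c in line:
--         size += 1
--         if c in seen:
--             debt -= 1
--         else:
--             seen[c] = True
--             debt += count[c] - 1
--         if debt == 0:
--             res.append(size)
--             size = 0
--     return res
-- ===== Notes on version B (the rewrite author's own statement) =====
-- stated objective: alternative
-- what changed: B partitions by occurrence counting: it precomputes each character's total count and maintains a running counter of occurrences of already-seen characters still ahead, cutting a group when that counter hits zero, instead of A's last-index table with a running maximum index compared to the current position.
import Mathlib
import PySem

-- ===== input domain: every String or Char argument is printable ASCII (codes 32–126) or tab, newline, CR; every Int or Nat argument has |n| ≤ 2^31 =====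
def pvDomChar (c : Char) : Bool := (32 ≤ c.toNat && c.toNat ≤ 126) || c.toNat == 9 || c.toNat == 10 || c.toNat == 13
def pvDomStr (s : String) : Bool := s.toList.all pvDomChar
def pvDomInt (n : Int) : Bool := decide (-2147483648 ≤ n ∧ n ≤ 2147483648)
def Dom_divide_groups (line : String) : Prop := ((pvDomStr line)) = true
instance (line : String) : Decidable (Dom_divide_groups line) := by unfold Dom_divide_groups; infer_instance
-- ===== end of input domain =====

-- B replaces A's last-occurrence-index table and running-max-index cut test by occurrence
-- counting with a running counter of still-pending occurrences of seen characters (alternative algorithm,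
-- same cost); the return values agree on all inputs.

-- ===== PORT A =====
-- one step of A's backward dict-building loop: `if line[i] not in dic: dic[line[i]] = i`
def stepDic (l : List Char) (d : PySem.Dict Char Int) (i : Int) : PySem.Dict Char Int :=
  let c := PySem.List.pyGetD l i ' '
  if d.contains c then d else d.insert c i

def buildLast (l : List Char) : PySem.Dict Char Int :=
  (PySem.List.pyRange ((l.length : Int) - 1) (-1) (-1)).foldl (stepDic l) PySem.Dict.empty

-- one step of A's main loop over enumerate(line); state = (begin, end, res)
def stepA (dic : PySem.Dict Char Int) (st : Int × Int × List Int) (xy : Int × Char) :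
    Int × Int × List Int :=
  let e := if dic.getD xy.2 0 > st.2.1 then dic.getD xy.2 0 else st.2.1
  if xy.1 = e then (xy.1 + 1, xy.1 + 1, st.2.2 ++ [e - st.1 + 1])
  else (st.1, e, st.2.2)

def divide_groups (line : String) : List Int :=
  let l := line.toList
  let dic := buildLast l
  ((PySem.List.enumerate l 0).foldl (stepA dic) (0, 0, [])).2.2

-- ===== PORT B =====
-- `count[c] = count.get(c, 0) + 1` over the whole string
def buildCount (l : List Char) : PySem.Dict Char Int :=
  l.foldl (fun d c => d.insert c (d.getD c 0 + 1)) PySem.Dict.empty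

-- one step of B's loop; state = (size, debt, seen, res)
def stepB (cnt : PySem.Dict Char Int) (st : Int × Int × PySem.Dict Char Bool × List Int)
    (c : Char) : Int × Int × PySem.Dict Char Bool × List Int :=
  let size := st.1 + 1
  let ds : Int × PySem.Dict Char Bool :=
    if st.2.2.1.contains c then (st.2.1 - 1, st.2.2.1)
    else (st.2.1 + cnt.getD c 0 - 1, st.2.2.1.insert c true)
  if ds.1 = 0 then (0, ds.1, ds.2, st.2.2.2 ++ [size])
  else (size, ds.1, ds.2, st.2.2.2)

def divide_groups_alt (line : String) : List Int :=
  let l := line.toList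
  let cnt := buildCount l
  (l.foldl (stepB cnt) (0, 0, PySem.Dict.empty, [])).2.2.2

-- ===== PRECONDITION & SPEC =====
def Spec_divide_groups (line : String) (out : List Int) : Prop := out = divide_groups_alt line
instance (line : String) (out : List Int) : Decidable (Spec_divide_groups line out) := by unfold Spec_divide_groups; infer_instance

-- ===== CLAIM (what is proved, stated in full; the proofs are below) =====
def Claim_equal_divide_groups : Prop := ∀ (line : String), Dom_divide_groups line → Spec_divide_groups line (divide_groups line)

-- ===== LEMMAS AND PROOFS =====

-- `lastIn l k c`: the last index j < k with l[j] = c, if any (what A's dict stores)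
def lastIn (l : List Char) : Nat → Char → Option Nat
  | 0, _ => none
  | k+1, c => if l[k]? = some c then some k else lastIn l k c

lemma lastIn_spec (l : List Char) (c : Char) :
    ∀ k j, lastIn l k c = some j → j < k ∧ l[j]? = some c := by
  intro k
  induction k with
  | zero => intro j h; simp [lastIn] at h
  | succ k ih =>
    intro j h
    simp only [lastIn] at h
    split at h
    · rename_i hk
      cases h; exact ⟨Nat.lt_succ_self _, hk⟩
    · rcases ih j h with ⟨h1, h2⟩
      exact ⟨Nat.lt_succ_of_lt h1, h2⟩

lemma lastIn_ge (l : List Char) (c : Char) :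
    ∀ k j, j < k → l[j]? = some c → ∃ j', lastIn l k c = some j' ∧ j ≤ j' := by
  intro k
  induction k with
  | zero => intro j h; omega
  | succ k ih =>
    intro j hj hjc
    simp only [lastIn]
    split
    · exact ⟨k, rfl, by omega⟩
    · rename_i hk
      have hjk : j < k := by
        rcases Nat.lt_succ_iff_lt_or_eq.mp hj with h | h
        · exact h
        · subst h; exact absurd hjc hk
      exact ih j hjk hjc

lemma buildLast_get (l : List Char) :
    ∀ (k : Nat) (d : PySem.Dict Char Int), k ≤ l.length → ∀ c,
      ((PySem.List.pyRange ((k : Int) - 1) (-1) (-1)).foldl (stepDic l) d).get? c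
        = if d.contains c then d.get? c else (lastIn l k c).map (fun j => (j : Int)) := by
  intro k
  induction k with
  | zero =>
    intro d _ c
    rw [show ((0:Nat):Int) - 1 = -1 by norm_num,
      PySem.List.pyRange_neg_one_eq_nil (by norm_num)]
    simp only [List.foldl_nil, lastIn]
    split
    · rfl
    · rename_i h
      exact (PySem.Dict.get?_eq_none_iff_contains d c).mpr (by simpa using h)
  | succ k ih =>
    intro d hk c
    have hk' : k < l.length := hk
    rw [show ((k+1:Nat):Int) - 1 = (k:Int) by push_cast; ring,
      PySem.List.pyRange_neg_one_cons (by omega)]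
    rw [List.foldl_cons]
    have hget : PySem.List.pyGetD l ((k:Int)) ' ' = l[k] := by
      simp [PySem.List.pyGetD_natCast, List.getD_eq_getElem?_getD, List.getElem?_eq_getElem hk']
    have hsome : l[k]? = some l[k] := List.getElem?_eq_getElem hk'
    by_cases hcon : d.contains l[k]
    · have hstep : stepDic l d (k:Int) = d := by simp [stepDic, hget, hcon]
      rw [hstep, ih d (Nat.le_of_succ_le hk)]
      by_cases hc : d.contains c
      · simp [hc]
      · have : lastIn l (k+1) c = lastIn l k c := by
          simp only [lastIn]
          split
          · rename_i he
            rw [hsome] at he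
            obtain rfl : l[k] = c := by simpa using he
            exact absurd hcon (by simpa using hc)
          · rfl
        simp [hc, this]
    · have hstep : stepDic l d (k:Int) = d.insert l[k] (k:Int) := by simp [stepDic, hget, hcon]
      rw [hstep, ih _ (Nat.le_of_succ_le hk)]
      by_cases hceq : c = l[k]
      · subst hceq
        simp only [PySem.Dict.contains_insert_self, if_true, PySem.Dict.get?_insert_self]
        rw [if_neg (by simp [hcon])]
        simp [lastIn, hsome]
      · have hne : ¬ (l[k]? = some c) := by
          rw [hsome]; exact fun h => hceq (by injection h with h2; exact h2.symm)
        have h3 : lastIn l (k+1) c = lastIn l k c := by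
          simp only [lastIn]; rw [if_neg hne]
        simp only [PySem.Dict.contains_insert, PySem.Dict.get?_insert, h3]
        simp [hceq]


lemma buildLast_getD (l : List Char) (c : Char) :
    (buildLast l).getD c 0 = ((lastIn l l.length c).map (fun j => (j : Int))).getD 0 := by
  rw [PySem.Dict.getD_eq_get?_getD]
  unfold buildLast
  rw [buildLast_get l l.length PySem.Dict.empty (le_refl _) c]
  simp [PySem.Dict.contains_empty]

lemma Hocc_buildLast (l : List Char) :
    ∀ (j : Nat) (c : Char), l[j]? = some c → (j : Int) ≤ (buildLast l).getD c 0 := by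
  intro j c hj
  have hjlen : j < l.length := by
    by_contra h
    rw [List.getElem?_eq_none (by omega)] at hj
    cases hj
  obtain ⟨j', hj', hle⟩ := lastIn_ge l c l.length j hjlen hj
  rw [buildLast_getD, hj']
  simpa using hle

lemma Hmem_buildLast (l : List Char) :
    ∀ c ∈ l, ∃ j : Nat, l[j]? = some c ∧ (buildLast l).getD c 0 = (j : Int) := by
  intro c hc
  obtain ⟨i, hi, hieq⟩ := List.mem_iff_getElem.mp hc
  have hisome : l[i]? = some c := by rw [List.getElem?_eq_getElem hi, hieq]
  obtain ⟨j', hj', _⟩ := lastIn_ge l c l.length i hi hisome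
  obtain ⟨hlt, hspec⟩ := lastIn_spec l c l.length j' hj'
  exact ⟨j', hspec, by rw [buildLast_getD, hj']; simp⟩

lemma Hcnt_buildCount (l : List Char) (c : Char) :
    (buildCount l).getD c 0 = (l.count c : Int) := by
  unfold buildCount
  simp [PySem.Dict.getD_foldl_insert_add_one, PySem.Dict.getD_empty]

lemma countP_append_single (s : List Char) (p : List Char) (c : Char) (hc : c ∉ p) :
    s.countP (fun d => decide (d ∈ p ++ [c]))
      = s.countP (fun d => decide (d ∈ p)) + s.count c := by
  induction s with
  | nil => simp
  | cons a s ih =>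
    simp only [List.countP_cons, List.count_cons, ih]
    by_cases h : a = c
    · subst h; simp [hc]; omega
    · by_cases hp : a ∈ p
      · simp [h, hp]
        omega
      · simp [h, hp]

lemma main_loop (dic cnt : PySem.Dict Char Int) (l : List Char)
    (Hocc : ∀ (j : Nat) (c : Char), l[j]? = some c → (j : Int) ≤ dic.getD c 0)
    (Hmem : ∀ c ∈ l, ∃ j : Nat, l[j]? = some c ∧ dic.getD c 0 = (j : Int))
    (Hcnt : ∀ c ∈ l, cnt.getD c 0 = (l.count c : Int)) :
    ∀ (s p : List Char) (size e : Int) (seen : PySem.Dict Char Bool) (r : List Int),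
      l = p ++ s →
      0 ≤ size → size ≤ (p.length : Int) →
      (∀ c, seen.contains c = decide (c ∈ p)) →
      (∀ c ∈ p, dic.getD c 0 ≤ e) →
      (e = (p.length : Int) - size ∨ ∃ c ∈ p, dic.getD c 0 = e) →
      ((PySem.List.enumerate s (p.length : Int)).foldl (stepA dic)
          ((p.length : Int) - size, e, r)).2.2
        = (s.foldl (stepB cnt)
            (size, (s.countP (fun d => decide (d ∈ p)) : Int), seen, r)).2.2.2 := by
  intro s
  induction s with
  | nil =>
    intro p size e seen r _ _ _ _ _ _
    simp [PySem.List.enumerate_nil]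
  | cons c s' ih =>
    intro p size e seen r hl hsz0 hszle hseen he2 he3
    rw [PySem.List.enumerate_cons, List.foldl_cons, List.foldl_cons]
    have hcl : c ∈ l := by rw [hl]; simp
    have hlx : l[p.length]? = some c := by
      rw [hl, List.getElem?_append_right (le_refl _)]
      simp
    have hgecx : (p.length : Int) ≤ dic.getD c 0 := Hocc _ _ hlx
    set x : Int := (p.length : Int) with hxdef
    set e₁ : Int := if dic.getD c 0 > e then dic.getD c 0 else e with he₁def
    have he₁ : e ≤ e₁ ∧ dic.getD c 0 ≤ e₁ ∧ (e₁ = e ∨ e₁ = dic.getD c 0) := by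
      rw [he₁def]; split_ifs with h
      · exact ⟨le_of_lt h, le_refl _, Or.inr rfl⟩
      · exact ⟨le_refl _, by omega, Or.inl rfl⟩
    have hA : stepA dic (x - size, e, r) (x, c)
        = if x = e₁ then (x + 1, x + 1, r ++ [e₁ - (x - size) + 1]) else (x - size, e₁, r) := by
      simp only [stepA, ← he₁def]
    have hlen : ((p ++ [c]).length : Int) = x + 1 := by simp [hxdef]
    have hl' : l = (p ++ [c]) ++ s' := by rw [hl]; simp
    -- bridge: the cut condition of A is the debt-zero condition of B
    have hP : (∀ d ∈ p ++ [c], dic.getD d 0 ≤ x) ↔ (∀ d ∈ p ++ [c], d ∉ s') := by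
      constructor
      · intro h d hd hmem
        obtain ⟨i, hi, hieq⟩ := List.mem_iff_getElem.mp hmem
        have hstep : (p.length + 1 + i) - p.length = i + 1 := by omega
        have hj : l[p.length + 1 + i]? = some d := by
          rw [hl, List.getElem?_append_right (by omega), hstep, List.getElem?_cons_succ,
            List.getElem?_eq_getElem hi, hieq]
        have := Hocc _ _ hj
        have := h d hd
        have : ((p.length + 1 + i : Nat) : Int) ≤ x := le_trans (Hocc _ _ hj) (h d hd)
        rw [hxdef] at this
        push_cast at this
        omega
      · intro h d hd
        have hdl : d ∈ l := by
          rw [hl]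
          rcases List.mem_append.mp hd with h' | h'
          · exact List.mem_append_left _ h'
          · have : d = c := by simpa using h'
            subst this; simp
        obtain ⟨j, hj, hjeq⟩ := Hmem d hdl
        rw [hjeq]
        by_contra hgt
        have hgt' : p.length < j := by
          rw [hxdef] at hgt; omega
        have hds' : d ∈ s' := by
          rw [hl, List.getElem?_append_right (by omega)] at hj
          have hstep : j - p.length = (j - p.length - 1) + 1 := by omega
          rw [hstep, List.getElem?_cons_succ] at hj
          exact List.mem_of_getElem? hj
        exact h d hd hds'
    have hPiff : (x = e₁) ↔ (∀ d ∈ p ++ [c], dic.getD d 0 ≤ x) := by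
      constructor
      · intro hx d hd
        rcases List.mem_append.mp hd with h' | h'
        · exact le_trans (he2 d h') (by rw [hx]; exact he₁.1)
        · have : d = c := by simpa using h'
          subst this
          rw [hx]; exact he₁.2.1
      · intro hp
        have hcx : dic.getD c 0 = x := le_antisymm (hp c (by simp)) hgecx
        have hex : e ≤ x := by
          rcases he3 with h' | ⟨d, hd, hde⟩
          · omega
          · rw [← hde]; exact hp d (List.mem_append_left _ hd)
        rcases he₁.2.2 with h' | h'
        · have : x ≤ e := by rw [← hcx, ← h']; exact he₁.2.1
          omega
        · omega
    have hDiff : (((s'.countP (fun d => decide (d ∈ p ++ [c])) : Nat) : Int) = 0)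
        ↔ (∀ d ∈ p ++ [c], d ∉ s') := by
      rw [Int.natCast_eq_zero, List.countP_eq_zero]
      constructor
      · intro h d hd hds'
        exact (by simpa using h d hds' : d ∉ p ++ [c]) hd
      · intro h a ha
        simp only [decide_eq_true_eq]
        exact fun hmem => h a hmem ha
    have hcutiff : (x = e₁) ↔ (((s'.countP (fun d => decide (d ∈ p ++ [c])) : Nat) : Int) = 0) := by
      rw [hPiff, hP, ← hDiff]
    by_cases hcp : c ∈ p
    · -- c already seen
      have hsc : seen.contains c = true := by rw [hseen]; simpa using hcp
      have hmemiff : ∀ d : Char, d ∈ p ↔ d ∈ p ++ [c] := by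
        intro d
        constructor
        · exact fun h => List.mem_append_left _ h
        · intro h
          rcases List.mem_append.mp h with h | h
          · exact h
          · have : d = c := by simpa using h
            subst this; exact hcp
      have hcongr : s'.countP (fun d => decide (d ∈ p)) = s'.countP (fun d => decide (d ∈ p ++ [c])) :=
        List.countP_congr (fun a _ => by
          rw [decide_eq_true_iff, decide_eq_true_iff]
          exact hmemiff a)
      have hdebt1 : (((c :: s').countP (fun d => decide (d ∈ p)) : Nat) : Int) - 1
          = ((s'.countP (fun d => decide (d ∈ p ++ [c])) : Nat) : Int) := by
        have hdec : (decide (c ∈ p)) = true := by simpa using hcp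
        rw [List.countP_cons, hcongr, hdec]
        simp
      have hB : stepB cnt (size, (((c :: s').countP (fun d => decide (d ∈ p)) : Nat) : Int), seen, r) c
          = if ((s'.countP (fun d => decide (d ∈ p ++ [c])) : Nat) : Int) = 0 then
              (0, ((s'.countP (fun d => decide (d ∈ p ++ [c])) : Nat) : Int), seen, r ++ [size + 1])
            else (size + 1, ((s'.countP (fun d => decide (d ∈ p ++ [c])) : Nat) : Int), seen, r) := by
        simp only [stepB, hsc, if_true, hdebt1]
      rw [hA, hB]
      have hseen' : ∀ d, seen.contains d = decide (d ∈ p ++ [c]) := by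
        intro d
        rw [hseen d]
        simp only [decide_eq_decide]
        exact hmemiff d
      by_cases hcut : x = e₁
      · rw [if_pos hcut, if_pos (hcutiff.mp hcut)]
        have harg : e₁ - (x - size) + 1 = size + 1 := by rw [← hcut]; ring
        rw [harg]
        have hPd : ∀ d ∈ p ++ [c], dic.getD d 0 ≤ x := hPiff.mp hcut
        have H := ih (p ++ [c]) 0 (x + 1) seen (r ++ [size + 1]) hl' (le_refl 0)
          (by rw [hlen]; omega) hseen'
          (fun d hd => le_trans (hPd d hd) (by omega))
          (Or.inl (by rw [hlen]; ring))
        rw [hlen] at H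
        simpa using H
      · rw [if_neg hcut, if_neg (fun h => hcut (hcutiff.mpr h))]
        have hb : x - size = ((p ++ [c]).length : Int) - (size + 1) := by rw [hlen]; ring
        have H := ih (p ++ [c]) (size + 1) e₁ seen r hl' (by omega)
          (by rw [hlen]; omega) hseen'
          (by
            intro d hd
            rcases List.mem_append.mp hd with h' | h'
            · exact le_trans (he2 d h') he₁.1
            · have : d = c := by simpa using h'
              subst this; exact he₁.2.1)
          (by
            rcases he₁.2.2 with h' | h'
            · rcases he3 with h'' | ⟨d, hd, hde⟩
              · exact Or.inl (by rw [h', h'', hlen]; ring)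
              · exact Or.inr ⟨d, List.mem_append_left _ hd, by rw [hde, h']⟩
            · exact Or.inr ⟨c, by simp, h'.symm⟩)
        rw [hlen] at H
        rw [show x + 1 - (size + 1) = x - size from by ring] at H
        exact H
    · -- c not yet seen
      have hsc : seen.contains c = false := by rw [hseen]; simpa using hcp
      have hcount : l.count c = 1 + s'.count c := by
        rw [hl]
        simp [List.count_append, List.count_eq_zero.mpr hcp]
        omega
      have hdebt1 : (((c :: s').countP (fun d => decide (d ∈ p)) : Nat) : Int) + cnt.getD c 0 - 1
          = ((s'.countP (fun d => decide (d ∈ p ++ [c])) : Nat) : Int) := by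
        rw [Hcnt c hcl, hcount, List.countP_cons, countP_append_single s' p c hcp]
        simp [hcp]
        ring
      have hB : stepB cnt (size, (((c :: s').countP (fun d => decide (d ∈ p)) : Nat) : Int), seen, r) c
          = if ((s'.countP (fun d => decide (d ∈ p ++ [c])) : Nat) : Int) = 0 then
              (0, ((s'.countP (fun d => decide (d ∈ p ++ [c])) : Nat) : Int), seen.insert c true, r ++ [size + 1])
            else (size + 1, ((s'.countP (fun d => decide (d ∈ p ++ [c])) : Nat) : Int), seen.insert c true, r) := by
        simp only [stepB, hsc, Bool.false_eq_true, if_false, hdebt1]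
      rw [hA, hB]
      have hseen' : ∀ d, (seen.insert c true).contains d = decide (d ∈ p ++ [c]) := by
        intro d
        rw [PySem.Dict.contains_insert]
        by_cases hdc : d = c
        · subst hdc; simp
        · simp [List.mem_append, hdc, hseen d]
      by_cases hcut : x = e₁
      · rw [if_pos hcut, if_pos (hcutiff.mp hcut)]
        have harg : e₁ - (x - size) + 1 = size + 1 := by rw [← hcut]; ring
        rw [harg]
        have hPd : ∀ d ∈ p ++ [c], dic.getD d 0 ≤ x := hPiff.mp hcut
        have H := ih (p ++ [c]) 0 (x + 1) (seen.insert c true) (r ++ [size + 1]) hl' (le_refl 0)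
          (by rw [hlen]; omega) hseen'
          (fun d hd => le_trans (hPd d hd) (by omega))
          (Or.inl (by rw [hlen]; ring))
        rw [hlen] at H
        simpa using H
      · rw [if_neg hcut, if_neg (fun h => hcut (hcutiff.mpr h))]
        have hb : x - size = ((p ++ [c]).length : Int) - (size + 1) := by rw [hlen]; ring
        have H := ih (p ++ [c]) (size + 1) e₁ (seen.insert c true) r hl' (by omega)
          (by rw [hlen]; omega) hseen'
          (by
            intro d hd
            rcases List.mem_append.mp hd with h' | h'
            · exact le_trans (he2 d h') he₁.1
            · have : d = c := by simpa using h'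
              subst this; exact he₁.2.1)
          (by
            rcases he₁.2.2 with h' | h'
            · rcases he3 with h'' | ⟨d, hd, hde⟩
              · exact Or.inl (by rw [h', h'', hlen]; ring)
              · exact Or.inr ⟨d, List.mem_append_left _ hd, by rw [hde, h']⟩
            · exact Or.inr ⟨c, by simp, h'.symm⟩)
        rw [hlen] at H
        rw [show x + 1 - (size + 1) = x - size from by ring] at H
        exact H


-- ===== VERDICT (by name: the statement is the Claim_ definition above) =====
theorem divide_groups_spec : Claim_equal_divide_groups := by
  unfold Claim_equal_divide_groups
  intro line _
  unfold Spec_divide_groups divide_groups divide_groups_alt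
  have H := main_loop (buildLast line.toList) (buildCount line.toList) line.toList
    (Hocc_buildLast line.toList) (Hmem_buildLast line.toList)
    (fun c _ => Hcnt_buildCount line.toList c)
    line.toList [] 0 0 PySem.Dict.empty []
    (by simp) (le_refl 0) (by simp) (fun c => by simp [PySem.Dict.contains_empty])
    (by simp) (Or.inl (by simp))
  simpa using H
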